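-- pv_equiv track=rewrite | github.com/sanic-org/tracerite | tracerite/trace.py | _create_fragments_with_highlighting
-- ===== SOURCE A (Python) =====
-- def _positions_to_consecutive_ranges(positions):
--     """Convert a set/list of positions to consecutive (start, end) ranges."""
--     if not positions:
--         return []
--
--     sorted_positions = sorted(set(positions))
--     ranges = []
--     start = sorted_positions[0]
--     end = start + 1
--
--     for pos in sorted_positions[1:]:
--         if pos == end:
--             # Consecutive position, extend current range
--             end = pos + 1
--         else:
--             # Gap found, close current range and start new one
--             ranges.append((start, end))
--             start = pos
--             end = pos + 1
--
--     # Close the last range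
--     ranges.append((start, end))
--     return ranges
--
-- def _get_highlight_boundaries(text, mark_positions, em_positions):
--     """Get all boundaries for highlighting (start/end of mark and em regions)."""
--     boundaries = {0, len(text)}
--
--     # Add mark boundaries
--     for start, end in _positions_to_consecutive_ranges(mark_positions):
--         boundaries.add(start)
--         boundaries.add(end)
--
--     # Add em boundaries
--     for start, end in _positions_to_consecutive_ranges(em_positions):
--         boundaries.add(start)
--         boundaries.add(end)
--
--     return sorted(boundaries)
--
-- def _create_fragments_with_highlighting(text, mark_positions, em_positions):
--     """Create fragments with mark/em highlighting using beg/mid/fin/solo logic."""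
--     if not text:
--         return []
--
--     # Get all boundaries and create fragments
--     boundaries = _get_highlight_boundaries(text, mark_positions, em_positions)
--     mark_ranges = _positions_to_consecutive_ranges(mark_positions)
--     em_ranges = _positions_to_consecutive_ranges(em_positions)
--
--     fragments = []
--     for i in range(len(boundaries) - 1):
--         start = boundaries[i]
--         end = boundaries[i + 1]
--
--         if start >= len(text):
--             break
--
--         fragment_text = text[start:end]
--         fragment = {"code": fragment_text}
--
--         # Determine mark status
--         mark_status = _get_highlight_status(start, end, mark_ranges)
--         if mark_status:
--             fragment["mark"] = mark_status
--
--         # Determine em status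
--         em_status = _get_highlight_status(start, end, em_ranges)
--         if em_status:
--             fragment["em"] = em_status
--
--         fragments.append(fragment)
--
--     return fragments
--
-- def _get_highlight_status(frag_start, frag_end, ranges):
--     """Determine beg/mid/fin/solo status for a fragment within ranges."""
--     # Find overlapping ranges
--     overlapping = []
--     for range_start, range_end in ranges:
--         if frag_start < range_end and frag_end > range_start:
--             overlapping.append((range_start, range_end))
--
--     if not overlapping:
--         return None
--
--     # Use the first overlapping range (they should align with fragment boundaries)
--     range_start, range_end = overlapping[0]
--
--     is_start = frag_start <= range_start
--     is_end = frag_end >= range_end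
--
--     if is_start and is_end:
--         return "solo"
--     elif is_start:
--         return "beg"
--     elif is_end:
--         return "fin"
--     else:
--         return "mid"
-- ===== SOURCE B (Python) =====
-- def _runs(positions):
--     """Maximal consecutive runs of the distinct sorted positions, found by scanning each run to its end."""
--     out = []
--     ps = sorted(set(positions))
--     i = 0
--     while i < len(ps):
--         j = i + 1
--         while j < len(ps) and ps[j] == ps[j - 1] + 1:
--             j += 1
--         out.append((ps[i], ps[j - 1] + 1))
--         i = j
--     return out
--
-- def _status_at(start, end, ranges, i):
--     """beg/mid/fin/solo status against ranges[i], the first range whose end exceeds start."""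
--     if i >= len(ranges):
--         return None
--     rs, re = ranges[i]
--     if rs >= end:
--         return None
--     if start <= rs:
--         return "solo" if end >= re else "beg"
--     return "fin" if end >= re else "mid"
--
-- def _create_fragments_with_highlighting(text, mark_positions, em_positions):
--     if not text:
--         return []
--     mark_ranges = _runs(mark_positions)
--     em_ranges = _runs(em_positions)
--     bset = {0, len(text)}
--     for s, e in mark_ranges:
--         bset.add(s)
--         bset.add(e)
--     for s, e in em_ranges:
--         bset.add(s)
--         bset.add(e)
--     boundaries = sorted(bset)
--     fragments = []
--     mi = ei = 0
--     for start, end in zip(boundaries, boundaries[1:]):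
--         if start >= len(text):
--             break
--         fragment = {"code": text[start:end]}
--         while mi < len(mark_ranges) and mark_ranges[mi][1] <= start:
--             mi += 1
--         st = _status_at(start, end, mark_ranges, mi)
--         if st:
--             fragment["mark"] = st
--         while ei < len(em_ranges) and em_ranges[ei][1] <= start:
--             ei += 1
--         st = _status_at(start, end, em_ranges, ei)
--         if st:
--             fragment["em"] = st
--         fragments.append(fragment)
--     return fragments
-- ===== Notes on version B (the rewrite author's own statement) =====
-- stated objective: faster
-- what changed: B replaces A's per-fragment linear scan over all highlight ranges (_get_highlight_status) by a single monotone pointer per sorted range list advanced across the sorted boundary fragments, and builds consecutive-position ranges by scanning each run to its end instead of A's element-by-element accumulator fold.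
import Mathlib
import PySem

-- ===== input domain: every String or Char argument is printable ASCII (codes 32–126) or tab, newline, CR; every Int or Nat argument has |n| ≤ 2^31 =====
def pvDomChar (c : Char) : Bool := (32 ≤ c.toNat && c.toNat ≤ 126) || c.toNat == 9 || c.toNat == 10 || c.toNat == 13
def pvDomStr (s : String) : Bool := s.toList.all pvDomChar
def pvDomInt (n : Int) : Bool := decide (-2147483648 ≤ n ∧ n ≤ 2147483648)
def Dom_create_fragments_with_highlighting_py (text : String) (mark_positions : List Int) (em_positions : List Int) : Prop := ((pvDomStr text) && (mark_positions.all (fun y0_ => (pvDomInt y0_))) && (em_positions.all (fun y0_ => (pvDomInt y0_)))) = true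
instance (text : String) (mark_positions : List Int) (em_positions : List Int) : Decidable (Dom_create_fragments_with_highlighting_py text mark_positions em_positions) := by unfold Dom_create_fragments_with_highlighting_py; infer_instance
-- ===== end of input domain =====

-- B replaces A's per-fragment linear scan over all highlight ranges by a single forward pointer per
-- range list (boundaries and ranges are both sorted), and finds consecutive runs by scanning each run
-- to its end instead of A's element-by-element accumulator fold: objective faster (measured).

-- ===== PORT A =====
def aRangesStep (st : List (Int × Int) × Int × Int) (pos : Int) : List (Int × Int) × Int × Int :=
  if pos = st.2.2 then (st.1, st.2.1, pos + 1)
  else (st.1 ++ [(st.2.1, st.2.2)], pos, pos + 1)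

-- _positions_to_consecutive_ranges
def a_ranges (positions : List Int) : List (Int × Int) :=
  if positions = [] then []
  else
    match PySem.List.sorted (PySem.Set.ofList positions) (fun x => x) false with
    | [] => []
    | p0 :: rest =>
      let st := rest.foldl aRangesStep ([], p0, p0 + 1)
      st.1 ++ [(st.2.1, st.2.2)]

-- _get_highlight_boundaries
def a_boundaries (text : String) (mark_positions em_positions : List Int) : List Int :=
  let b0 : PySem.Set Int := PySem.Set.ofList [0, (text.toList.length : Int)]
  let b1 := (a_ranges mark_positions).foldl (fun b r => PySem.Set.add (PySem.Set.add b r.1) r.2) b0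
  let b2 := (a_ranges em_positions).foldl (fun b r => PySem.Set.add (PySem.Set.add b r.1) r.2) b1
  PySem.List.sorted b2 (fun x => x) false

-- _get_highlight_status
def a_status (fs fe : Int) (ranges : List (Int × Int)) : Option String :=
  let overlapping := ranges.filter (fun r => decide (fs < r.2) && decide (fe > r.1))
  match overlapping with
  | [] => none
  | (rs, re) :: _ =>
    if fs ≤ rs ∧ fe ≥ re then some "solo"
    else if fs ≤ rs then some "beg"
    else if fe ≥ re then some "fin"
    else some "mid"

-- one iteration body of A's fragment loop
def a_frag (tl : List Char) (s e : Int) (mr er : List (Int × Int)) : List (String × String) :=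
  let f0 := [("code", String.mk (PySem.List.slice tl (some s) (some e)))]
  let f1 := match a_status s e mr with | some st => f0 ++ [("mark", st)] | none => f0
  match a_status s e er with | some st => f1 ++ [("em", st)] | none => f1

-- 'for i in range(len(boundaries) - 1)' with the break
def a_loop (tl : List Char) (bs : List Int) (mr er : List (Int × Int)) : List Int → List (List (String × String))
  | [] => []
  | i :: is =>
    let s := PySem.List.pyGetD bs i 0
    let e := PySem.List.pyGetD bs (i + 1) 0
    if s ≥ (tl.length : Int) then []
    else a_frag tl s e mr er :: a_loop tl bs mr er is

def create_fragments_with_highlighting_py (text : String) (mark_positions : List Int) (em_positions : List Int) : List (List (String × String)) :=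
  let tl := text.toList
  if tl = [] then []
  else
    let bs := a_boundaries text mark_positions em_positions
    let mr := a_ranges mark_positions
    let er := a_ranges em_positions
    a_loop tl bs mr er (PySem.List.pyRange 0 (PySem.List.len bs - 1) 1)

-- ===== PORT B =====
-- inner while of _runs: scan the current run to its end
def b_runEnd (ps : List Int) (j : Nat) : Nat :=
  if h : j < ps.length ∧ PySem.List.pyGetD ps (j : Int) 0 = PySem.List.pyGetD ps ((j : Int) - 1) 0 + 1 then
    b_runEnd ps (j + 1)
  else j
termination_by ps.length - j
decreasing_by omega

theorem b_runEnd_ge (ps : List Int) (j : Nat) : j ≤ b_runEnd ps j := by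
  fun_induction b_runEnd ps j with
  | case1 j h ih => omega
  | case2 j h => omega

-- outer while of _runs
def b_runs_from (ps : List Int) (i : Nat) : List (Int × Int) :=
  if h : i < ps.length then
    let j := b_runEnd ps (i + 1)
    (PySem.List.pyGetD ps (i : Int) 0, PySem.List.pyGetD ps ((j : Int) - 1) 0 + 1) :: b_runs_from ps j
  else []
termination_by ps.length - i
decreasing_by have := b_runEnd_ge ps (i + 1); omega

def b_runs (positions : List Int) : List (Int × Int) :=
  b_runs_from (PySem.List.sorted (PySem.Set.ofList positions) (fun x => x) false) 0

-- the while-loop advancing the pointer past ranges that end at or before `s`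
def b_adv (ranges : List (Int × Int)) (s : Int) (k : Nat) : Nat :=
  if h : k < ranges.length ∧ (PySem.List.pyGetD ranges (k : Int) (0, 0)).2 ≤ s then
    b_adv ranges s (k + 1)
  else k
termination_by ranges.length - k
decreasing_by omega

-- _status_at
def b_status (s e : Int) (ranges : List (Int × Int)) (i : Nat) : Option String :=
  if i ≥ ranges.length then none
  else
    let r := PySem.List.pyGetD ranges (i : Int) (0, 0)
    if r.1 ≥ e then none
    else if s ≤ r.1 then (if e ≥ r.2 then some "solo" else some "beg")
    else (if e ≥ r.2 then some "fin" else some "mid")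

-- 'for start, end in zip(boundaries, boundaries[1:])' carrying the two pointers
def b_loop (tl : List Char) (mr er : List (Int × Int)) : List (Int × Int) → Nat → Nat → List (List (String × String))
  | [], _, _ => []
  | (s, e) :: rest, mi, ei =>
    if s ≥ (tl.length : Int) then []
    else
      let f0 := [("code", String.mk (PySem.List.slice tl (some s) (some e)))]
      let mi' := b_adv mr s mi
      let f1 := match b_status s e mr mi' with | some st => f0 ++ [("mark", st)] | none => f0
      let ei' := b_adv er s ei
      let f2 := match b_status s e er ei' with | some st => f1 ++ [("em", st)] | none => f1
      f2 :: b_loop tl mr er rest mi' ei'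

def create_fragments_with_highlighting_py_alt (text : String) (mark_positions : List Int) (em_positions : List Int) : List (List (String × String)) :=
  let tl := text.toList
  if tl = [] then []
  else
    let mr := b_runs mark_positions
    let er := b_runs em_positions
    let b0 : PySem.Set Int := PySem.Set.ofList [0, (tl.length : Int)]
    let b1 := mr.foldl (fun b r => PySem.Set.add (PySem.Set.add b r.1) r.2) b0
    let b2 := er.foldl (fun b r => PySem.Set.add (PySem.Set.add b r.1) r.2) b1
    let bs := PySem.List.sorted b2 (fun x => x) false
    b_loop tl mr er (bs.zip bs.tail) 0 0

-- ===== PRECONDITION & SPEC =====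
def Spec_create_fragments_with_highlighting_py (text : String) (mark_positions : List Int) (em_positions : List Int) (out : List (List (String × String))) : Prop := out = create_fragments_with_highlighting_py_alt text mark_positions em_positions
instance (text : String) (mark_positions : List Int) (em_positions : List Int) (out : List (List (String × String))) : Decidable (Spec_create_fragments_with_highlighting_py text mark_positions em_positions out) := by unfold Spec_create_fragments_with_highlighting_py; infer_instance

-- ===== CLAIM (what is proved, stated in full; the proofs are below) =====
def Claim_equal_create_fragments_with_highlighting_py : Prop := ∀ (text : String) (mark_positions : List Int) (em_positions : List Int), Dom_create_fragments_with_highlighting_py text mark_positions em_positions → Spec_create_fragments_with_highlighting_py text mark_positions em_positions (create_fragments_with_highlighting_py text mark_positions em_positions)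

-- ===== LEMMAS AND PROOFS =====

-- reference run-splitting recursion both range builders are reduced to
def runsGo (s e : Int) : List Int → List (Int × Int)
  | [] => [(s, e)]
  | q :: qs => if q = e then runsGo s (q + 1) qs else (s, e) :: runsGo q (q + 1) qs

theorem a_fold_eq_runsGo (l : List Int) : ∀ (acc : List (Int × Int)) (s e : Int),
    (l.foldl aRangesStep (acc, s, e)).1 ++ [((l.foldl aRangesStep (acc, s, e)).2.1, (l.foldl aRangesStep (acc, s, e)).2.2)]
      = acc ++ runsGo s e l := by
  induction l with
  | nil => intro acc s e; simp [runsGo]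
  | cons q qs ih =>
    intro acc s e
    simp only [List.foldl_cons, runsGo, aRangesStep]
    by_cases hq : q = e
    · simp [hq, ih]
    · simp [hq, ih]

theorem pyGetD_sub_one (ps : List Int) (j : Nat) (hj : 0 < j) :
    PySem.List.pyGetD ps ((j : Int) - 1) 0 = ps.getD (j - 1) 0 := by
  have h1 : ((j : Int) - 1) = ((j - 1 : Nat) : Int) := by omega
  rw [h1, PySem.List.pyGetD_natCast]

theorem b_runs_from_eq (ps : List Int) : ∀ (n j : Nat) (s : Int), ps.length - j ≤ n → 0 < j → j ≤ ps.length →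
    runsGo s (ps.getD (j - 1) 0 + 1) (ps.drop j)
      = (s, ps.getD (b_runEnd ps j - 1) 0 + 1) :: b_runs_from ps (b_runEnd ps j) := by
  intro n
  induction n with
  | zero =>
    intro j s hn hj hlen
    have hjl : j = ps.length := by omega
    rw [b_runEnd, dif_neg (by omega : ¬ (j < ps.length ∧ _))]
    rw [b_runs_from, dif_neg (by omega : ¬ j < ps.length)]
    rw [hjl, List.drop_length]
    simp [runsGo]
  | succ n ih =>
    intro j s hn hj hlen
    by_cases hjl : j < ps.length
    · have hdrop : ps.drop j = ps[j] :: ps.drop (j + 1) := List.drop_eq_getElem_cons hjl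
      have hgj : PySem.List.pyGetD ps ((j : Nat) : Int) 0 = ps[j] := by
        rw [PySem.List.pyGetD_natCast, List.getD_eq_getElem?_getD, List.getElem?_eq_getElem hjl, Option.getD_some]
      have hgj' : ps.getD j 0 = ps[j] := by
        rw [List.getD_eq_getElem?_getD, List.getElem?_eq_getElem hjl, Option.getD_some]
      rw [hdrop]
      by_cases hc : ps[j] = ps.getD (j - 1) 0 + 1
      · have hcond : j < ps.length ∧ PySem.List.pyGetD ps (j : Int) 0 = PySem.List.pyGetD ps ((j : Int) - 1) 0 + 1 := by
          refine ⟨hjl, ?_⟩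
          rw [hgj, pyGetD_sub_one ps j hj, hc]
        rw [show b_runEnd ps j = b_runEnd ps (j + 1) by rw [b_runEnd, dif_pos hcond]]
        have := ih (j + 1) s (by omega) (by omega) (by omega)
        simp only [Nat.add_sub_cancel, hgj'] at this
        simp only [runsGo, if_pos hc, this]
      · have hcond : ¬ (j < ps.length ∧ PySem.List.pyGetD ps (j : Int) 0 = PySem.List.pyGetD ps ((j : Int) - 1) 0 + 1) := by
          rw [not_and]
          intro _
          rw [hgj, pyGetD_sub_one ps j hj]
          exact hc
        rw [show b_runEnd ps j = j by rw [b_runEnd, dif_neg hcond]]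
        rw [b_runs_from, dif_pos hjl]
        have := ih (j + 1) (ps[j]) (by omega) (by omega) (by omega)
        simp only [Nat.add_sub_cancel, hgj'] at this
        simp only [runsGo, if_neg hc, this, hgj]
        rw [pyGetD_sub_one ps (b_runEnd ps (j + 1)) (by have := b_runEnd_ge ps (j + 1); omega)]
    · have hjl' : j = ps.length := by omega
      rw [b_runEnd, dif_neg (by omega : ¬ (j < ps.length ∧ _))]
      rw [b_runs_from, dif_neg (by omega : ¬ j < ps.length)]
      rw [hjl', List.drop_length]
      simp [runsGo]

theorem a_ranges_eq_runsGo (positions : List Int) :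
    a_ranges positions
      = (match PySem.List.sorted (PySem.Set.ofList positions) (fun x => x) false with
         | [] => []
         | p0 :: rest => runsGo p0 (p0 + 1) rest) := by
  unfold a_ranges
  by_cases hpos : positions = []
  · subst hpos
    rfl
  · rw [if_neg hpos]
    cases hs : PySem.List.sorted (PySem.Set.ofList positions) (fun x => x) false with
    | nil => rfl
    | cons p0 rest =>
      simp only
      have := a_fold_eq_runsGo rest [] p0 (p0 + 1)
      simpa using this

theorem b_runs_eq_runsGo (positions : List Int) :
    b_runs positions
      = (match PySem.List.sorted (PySem.Set.ofList positions) (fun x => x) false with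
         | [] => []
         | p0 :: rest => runsGo p0 (p0 + 1) rest) := by
  unfold b_runs
  cases hs : PySem.List.sorted (PySem.Set.ofList positions) (fun x => x) false with
  | nil => rw [b_runs_from, dif_neg (by simp)]
  | cons p0 rest =>
    simp only
    rw [b_runs_from, dif_pos (by simp : 0 < (p0 :: rest).length)]
    have := b_runs_from_eq (p0 :: rest) (p0 :: rest).length 1 p0 (by omega) (by omega) (by simp)
    simp only [List.drop_one, List.tail_cons, show (1 : Nat) - 1 = 0 from rfl, List.getD_cons_zero] at this
    rw [this]
    have hge : 1 ≤ b_runEnd (p0 :: rest) 1 := b_runEnd_ge _ 1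
    show ((PySem.List.pyGetD (p0 :: rest) ((0 : Nat) : Int) 0,
           PySem.List.pyGetD (p0 :: rest) ((b_runEnd (p0 :: rest) (0 + 1) : Int) - 1) 0 + 1) ::
           b_runs_from (p0 :: rest) (b_runEnd (p0 :: rest) (0 + 1))) = _
    rw [show (0 : Nat) + 1 = 1 from rfl]
    congr 1
    rw [PySem.List.pyGetD_natCast, pyGetD_sub_one (p0 :: rest) (b_runEnd (p0 :: rest) 1) (by omega)]
    rfl

theorem ranges_eq (positions : List Int) : a_ranges positions = b_runs positions := by
  rw [a_ranges_eq_runsGo, b_runs_eq_runsGo]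

theorem runsGo_starts (l : List Int) : ∀ (s e : Int), (∀ x ∈ l, s ≤ x) → l.Pairwise (· ≤ ·) →
    (∀ r ∈ runsGo s e l, s ≤ r.1) ∧ (runsGo s e l).Pairwise (fun r r' => r.1 ≤ r'.1) := by
  induction l with
  | nil => intro s e _ _; simp [runsGo]
  | cons q qs ih =>
    intro s e hall hp
    have hsq : s ≤ q := hall q (List.mem_cons_self ..)
    have hq : ∀ x ∈ qs, q ≤ x := (List.pairwise_cons.mp hp).1
    have hp' : qs.Pairwise (· ≤ ·) := (List.pairwise_cons.mp hp).2
    by_cases hqe : q = e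
    · have := ih s (q + 1) (fun x hx => le_trans hsq (hq x hx)) hp'
      simpa [runsGo, hqe] using this
    · obtain ⟨ihs, ihp⟩ := ih q (q + 1) hq hp'
      refine ⟨?_, ?_⟩
      · intro r hr
        simp only [runsGo, if_neg hqe, List.mem_cons] at hr
        rcases hr with rfl | hr
        · exact le_refl s
        · exact le_trans hsq (ihs r hr)
      · simp only [runsGo, if_neg hqe, List.pairwise_cons]
        exact ⟨fun r hr => le_trans hsq (ihs r hr), ihp⟩

theorem ranges_starts (positions : List Int) :
    (a_ranges positions).Pairwise (fun r r' => r.1 ≤ r'.1) := by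
  rw [a_ranges_eq_runsGo]
  have hlt := PySem.List.sorted_ofList_pairwise_lt positions
  cases hs : PySem.List.sorted (PySem.Set.ofList positions) (fun x => x) false with
  | nil => exact List.Pairwise.nil
  | cons p0 rest =>
    rw [hs] at hlt
    obtain ⟨h1, h2⟩ := List.pairwise_cons.mp hlt
    exact (runsGo_starts rest p0 (p0 + 1) (fun x hx => le_of_lt (h1 x hx)) (h2.imp le_of_lt)).2

theorem sorted_nodup_pairwise_lt (l : List Int) (h : l.Nodup) :
    (PySem.List.sorted l (fun x => x) false).Pairwise (· < ·) := by
  have hle := PySem.List.sorted_pairwise l (fun x => x)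
  have hnd : (PySem.List.sorted l (fun x => x) false).Nodup :=
    (PySem.List.sorted_perm l (fun x => x) false).nodup_iff.mpr h
  exact (hle.and hnd).imp (fun {a b} hab => lt_of_le_of_ne hab.1 hab.2)

theorem b_adv_skipped (ranges : List (Int × Int)) (s : Int) (k : Nat)
    (h : ∀ r ∈ ranges.take k, r.2 ≤ s) :
    ∀ r ∈ ranges.take (b_adv ranges s k), r.2 ≤ s := by
  fun_induction b_adv ranges s k with
  | case1 k h' ih =>
    apply ih
    intro r hr
    rw [List.take_succ] at hr
    rcases List.mem_append.mp hr with hr | hr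
    · exact h _ hr
    · obtain ⟨hk, hle⟩ := h'
      rw [PySem.List.pyGetD_natCast, List.getD_eq_getElem?_getD, List.getElem?_eq_getElem hk] at hle
      simp only [List.getElem?_eq_getElem hk, Option.toList_some, List.mem_singleton] at hr
      subst hr
      exact hle
  | case2 k h' => exact h

theorem b_adv_stop (ranges : List (Int × Int)) (s : Int) (k : Nat)
    (h : b_adv ranges s k < ranges.length) :
    s < (ranges.getD (b_adv ranges s k) (0, 0)).2 := by
  fun_induction b_adv ranges s k with
  | case1 k h' ih => exact ih h
  | case2 k h' =>
    rw [not_and_or] at h'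
    rcases h' with h' | h'
    · exact absurd h h'
    · rw [PySem.List.pyGetD_natCast] at h'
      omega

theorem status_eq (ranges : List (Int × Int)) (s e : Int) (k : Nat)
    (hp : ranges.Pairwise (fun r r' => r.1 ≤ r'.1))
    (hk : ∀ r ∈ ranges.take k, r.2 ≤ s) :
    a_status s e ranges = b_status s e ranges (b_adv ranges s k) := by
  have hsk : ∀ r ∈ ranges.take (b_adv ranges s k), r.2 ≤ s := b_adv_skipped ranges s k hk
  set k' := b_adv ranges s k with hk'def
  have hfilter : ranges.filter (fun r => decide (s < r.2) && decide (e > r.1))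
      = (ranges.drop k').filter (fun r => decide (s < r.2) && decide (e > r.1)) := by
    conv_lhs => rw [← List.take_append_drop k' ranges]
    rw [List.filter_append]
    have hnil : (ranges.take k').filter (fun r => decide (s < r.2) && decide (e > r.1)) = [] := by
      apply List.filter_eq_nil_iff.mpr
      intro r hr
      have := hsk r hr
      simp
      omega
    rw [hnil, List.nil_append]
  by_cases hlen : k' < ranges.length
  · have hdrop : ranges.drop k' = ranges[k'] :: ranges.drop (k' + 1) := by
      rw [List.drop_eq_getElem_cons hlen]
    have hstop : s < ranges[k'].2 := by
      have := b_adv_stop ranges s k hlen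
      rwa [← hk'def, List.getD_eq_getElem?_getD, List.getElem?_eq_getElem hlen] at this
    have hrest : ∀ r ∈ ranges.drop (k' + 1), ranges[k'].1 ≤ r.1 := by
      have hpd : (ranges.drop k').Pairwise (fun r r' => r.1 ≤ r'.1) := hp.sublist (List.drop_sublist k' ranges)
      rw [hdrop] at hpd
      exact (List.pairwise_cons.mp hpd).1
    have hb : PySem.List.pyGetD ranges ((k' : Nat) : Int) (0, 0) = ranges[k'] := by
      rw [PySem.List.pyGetD_natCast, List.getD_eq_getElem?_getD, List.getElem?_eq_getElem hlen, Option.getD_some]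
    obtain ⟨rs, re, hre⟩ : ∃ a b, ranges[k'] = (a, b) := ⟨_, _, rfl⟩
    rw [hre] at hstop hb
    unfold a_status b_status
    rw [hfilter, hdrop, hre]
    simp only [hb, if_neg (by omega : ¬ k' ≥ ranges.length)]
    by_cases hov : rs < e
    · have hcond : (decide (s < (rs, re).2) && decide (e > (rs, re).1)) = true := by simp; omega
      simp only [List.filter_cons, hcond, if_true]
      split_ifs <;> simp_all <;> omega
    · have hcond : (decide (s < (rs, re).2) && decide (e > (rs, re).1)) = false := by simp; omega
      have hnone : (ranges.drop (k' + 1)).filter (fun r => decide (s < r.2) && decide (e > r.1)) = [] := by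
        apply List.filter_eq_nil_iff.mpr
        intro r hr
        have := hrest r hr
        rw [hre] at this
        simp
        omega
      simp only [List.filter_cons, hcond, Bool.false_eq_true, if_false, hnone]
      rw [if_pos (by simpa using (by omega : (rs, re).1 ≥ e))]
  · have hdnil : ranges.drop k' = [] := List.drop_eq_nil_iff.mpr (by omega)
    unfold a_status b_status
    rw [hfilter, hdnil]
    simp only [List.filter_nil]
    rw [if_pos (by omega : k' ≥ ranges.length)]

theorem loop_eq (tl : List Char) (bs : List Int) (mr er : List (Int × Int))
    (hbs : bs.Pairwise (· ≤ ·))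
    (hmr : mr.Pairwise (fun r r' => r.1 ≤ r'.1)) (her : er.Pairwise (fun r r' => r.1 ≤ r'.1)) :
    ∀ (n i mi ei : Nat), bs.length - i ≤ n → i < bs.length →
    (∀ r ∈ mr.take mi, ∀ b ∈ bs.drop i, r.2 ≤ b) →
    (∀ r ∈ er.take ei, ∀ b ∈ bs.drop i, r.2 ≤ b) →
    a_loop tl bs mr er (PySem.List.pyRange (i : Int) (PySem.List.len bs - 1) 1)
      = b_loop tl mr er ((bs.drop i).zip (bs.drop (i + 1))) mi ei := by
  intro n
  induction n with
  | zero => intro i mi ei hn hi _ _; omega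
  | succ n ih =>
    intro i mi ei hn hi Hm He
    by_cases hlt : (i : Int) < PySem.List.len bs - 1
    · have hi1 : i + 1 < bs.length := by
        rw [PySem.List.len_eq] at hlt
        omega
      have hsg : PySem.List.pyGetD bs ((i : Nat) : Int) 0 = bs[i] := by
        rw [PySem.List.pyGetD_natCast, List.getD_eq_getElem?_getD, List.getElem?_eq_getElem hi, Option.getD_some]
      have heg : PySem.List.pyGetD bs (((i : Nat) : Int) + 1) 0 = bs[i + 1] := by
        rw [show (((i : Nat) : Int) + 1) = (((i + 1 : Nat)) : Int) by push_cast; ring]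
        rw [PySem.List.pyGetD_natCast, List.getD_eq_getElem?_getD, List.getElem?_eq_getElem hi1, Option.getD_some]
      have hdi : bs.drop i = bs[i] :: bs.drop (i + 1) := List.drop_eq_getElem_cons hi
      have hdi1 : bs.drop (i + 1) = bs[i + 1] :: bs.drop (i + 2) := List.drop_eq_getElem_cons hi1
      have hble : ∀ b ∈ bs.drop (i + 1), bs[i] ≤ b := by
        have hpd : (bs.drop i).Pairwise (· ≤ ·) := hbs.sublist (List.drop_sublist i bs)
        rw [hdi] at hpd
        exact (List.pairwise_cons.mp hpd).1
      rw [PySem.List.pyRange_one_cons hlt]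
      conv_rhs => rw [hdi, hdi1]
      rw [List.zip_cons_cons]
      rw [a_loop, b_loop]
      simp only [hsg, heg]
      by_cases hstop : bs[i] ≥ (tl.length : Int)
      · rw [if_pos hstop, if_pos hstop]
      · rw [if_neg hstop, if_neg hstop]
        have Hm1 : ∀ r ∈ mr.take mi, r.2 ≤ bs[i] := fun r hr => Hm r hr bs[i] (by rw [hdi]; exact List.mem_cons_self ..)
        have He1 : ∀ r ∈ er.take ei, r.2 ≤ bs[i] := fun r hr => He r hr bs[i] (by rw [hdi]; exact List.mem_cons_self ..)
        have hms := status_eq mr bs[i] bs[i + 1] mi hmr Hm1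
        have hes := status_eq er bs[i] bs[i + 1] ei her He1
        congr 1
        · unfold a_frag
          rw [hms, hes]
        · rw [show ((i : Nat) : Int) + 1 = (((i + 1 : Nat)) : Int) by push_cast; ring]
          rw [← hdi1]
          apply ih (i + 1) (b_adv mr bs[i] mi) (b_adv er bs[i] ei) (by omega) hi1
          · intro r hr b hb
            have hr2 : r.2 ≤ bs[i] := b_adv_skipped mr bs[i] mi Hm1 r hr
            exact le_trans hr2 (hble b hb)
          · intro r hr b hb
            have hr2 : r.2 ≤ bs[i] := b_adv_skipped er bs[i] ei He1 r hr
            exact le_trans hr2 (hble b hb)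
    · have hrange : PySem.List.pyRange (i : Int) (PySem.List.len bs - 1) 1 = [] := by
        rw [PySem.List.pyRange_one]
        have : ((PySem.List.len bs - 1 - (i : Int)).toNat) = 0 := by omega
        rw [this]
        simp
      have hnil : bs.drop (i + 1) = [] := by
        apply List.drop_eq_nil_iff.mpr
        rw [PySem.List.len_eq] at hlt
        omega
      rw [hrange, hnil, List.zip_nil_right]
      rfl

theorem nodup_foldl_add2 (l : List (Int × Int)) : ∀ (s : PySem.Set Int), s.Nodup →
    (l.foldl (fun b r => PySem.Set.add (PySem.Set.add b r.1) r.2) s).Nodup := by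
  induction l with
  | nil => intro s hs; exact hs
  | cons r rs ih =>
    intro s hs
    exact ih _ (PySem.Set.nodup_add _ _ (PySem.Set.nodup_add _ _ hs))

theorem mem_foldl_add2 (l : List (Int × Int)) : ∀ (s : PySem.Set Int) (x : Int), x ∈ s →
    x ∈ l.foldl (fun b r => PySem.Set.add (PySem.Set.add b r.1) r.2) s := by
  induction l with
  | nil => intro s x hx; exact hx
  | cons r rs ih =>
    intro s x hx
    exact ih _ x ((PySem.Set.mem_add _ _ _).mpr (Or.inl ((PySem.Set.mem_add _ _ _).mpr (Or.inl hx))))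

-- ===== VERDICT (by name: the statement is the Claim_ definition above) =====
theorem create_fragments_with_highlighting_py_spec : Claim_equal_create_fragments_with_highlighting_py := by
  intro text mp ep _
  unfold Spec_create_fragments_with_highlighting_py
  unfold create_fragments_with_highlighting_py create_fragments_with_highlighting_py_alt a_boundaries
  by_cases htl : text.toList = []
  · simp only [htl]
    rfl
  · simp only [if_neg htl]
    rw [← ranges_eq mp, ← ranges_eq ep]
    set mr := a_ranges mp with hmr
    set er := a_ranges ep with her
    set b0 : PySem.Set Int := PySem.Set.ofList [0, (text.toList.length : Int)] with hb0
    set b2 := er.foldl (fun b r => PySem.Set.add (PySem.Set.add b r.1) r.2)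
      (mr.foldl (fun b r => PySem.Set.add (PySem.Set.add b r.1) r.2) b0) with hb2
    set bs := PySem.List.sorted b2 (fun x => x) false with hbs
    have hnodup : b2.Nodup := by
      rw [hb2]
      exact nodup_foldl_add2 _ _ (nodup_foldl_add2 _ _ (PySem.Set.nodup_ofList _))
    have hbsp : bs.Pairwise (· ≤ ·) := (sorted_nodup_pairwise_lt b2 hnodup).imp le_of_lt
    have h0 : 0 < bs.length := by
      have hmem : (0 : Int) ∈ b2 := by
        rw [hb2]
        apply mem_foldl_add2
        apply mem_foldl_add2
        rw [hb0]
        exact (PySem.Set.mem_ofList _ _).mpr (List.mem_cons_self ..)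
      have hne : b2 ≠ [] := by
        intro h
        rw [h] at hmem
        exact absurd hmem (List.not_mem_nil)
      have := (PySem.List.sorted_eq_nil_iff b2 (fun x => x) false).not.mpr hne
      cases hbsq : bs with
      | nil => exact absurd (hbs ▸ hbsq) this
      | cons a l => simp
    have := loop_eq text.toList bs mr er hbsp (hmr ▸ ranges_starts mp) (her ▸ ranges_starts ep)
      bs.length 0 0 0 (by omega) h0 (by simp) (by simp)
    simpa [List.drop_one] using this
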